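-- pv_equiv track=rewrite | github.com/KSH23/algorithm_practice | Programmers/76503.py | solution
-- ===== SOURCE A (Python) =====
-- def solution(a, edges):
--     length = len(a)
--     visited = [False] * length  # 방문 표시
--     graph = [[] for _ in range(length)]  # node간 연결 그래프
--     for node1, node2 in edges:
--         graph[node1].append(node2)
--         graph[node2].append(node1)
--
--     def dfs(node):
--         count = 0  # 현재 node에서 진행하는 행동 횟수
--
--         for next_node in graph[node]:
--             if visited[next_node]:
--                 continue
--
--             visited[next_node] = True  # 방문하지 않은 node에 방문
--
--             # 다음 노드에서 사용한 행동 횟수 + 다음 노드를 0으로 만들기 위해 필요한 행동 횟수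
--             count += dfs(next_node) + abs(a[next_node])
--             a[node] += a[next_node]  # 현재 노드 가중치 갱신
--
--             visited[next_node] = False  # 방문 해제
--
--         return count
--
--     visited[0] = True  # 시작 노드
--     result = dfs(0)
--     if a[0] == 0:  # 가중치를 모두 0으로 만든 경우
--         return result
--     return -1
-- ===== SOURCE B (Python) =====
-- def solution(a, edges):
--     # Iterative explicit-stack reformulation of the recursive DFS; mutates `a`
--     # exactly as the original does (each a[node] becomes its accumulated sum).
--     n = len(a)
--     graph = [[] for _ in range(n)]
--     for u, v in edges:
--         graph[u].append(v)
--         graph[v].append(u)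
--     visited = [False] * n
--     visited[0] = True
--     total = 0
--     stack = [[0, 0]]  # frames [node, next neighbour index]
--     while stack:
--         node, i = stack[-1]
--         if i < len(graph[node]):
--             stack[-1][1] = i + 1
--             nxt = graph[node][i]
--             if not visited[nxt]:
--                 visited[nxt] = True
--                 stack.append([nxt, 0])
--         else:
--             stack.pop()
--             if stack:
--                 total += abs(a[node])
--                 a[stack[-1][0]] += a[node]
--                 visited[node] = False
--     return total if a[0] == 0 else -1
-- ===== Notes on version B (the rewrite author's own statement) =====
-- stated objective: alternative
-- what changed: The recursive DFS (mark child / recurse / unmark on a shared visited array) is replaced by an iterative post-order traversal over an explicit stack of [node, next-neighbour-index] frames: a finished node is popped, its abs-value added to the running total and its accumulated weight folded into the parent frame, eliminating Python call-stack recursion.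
import Mathlib
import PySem

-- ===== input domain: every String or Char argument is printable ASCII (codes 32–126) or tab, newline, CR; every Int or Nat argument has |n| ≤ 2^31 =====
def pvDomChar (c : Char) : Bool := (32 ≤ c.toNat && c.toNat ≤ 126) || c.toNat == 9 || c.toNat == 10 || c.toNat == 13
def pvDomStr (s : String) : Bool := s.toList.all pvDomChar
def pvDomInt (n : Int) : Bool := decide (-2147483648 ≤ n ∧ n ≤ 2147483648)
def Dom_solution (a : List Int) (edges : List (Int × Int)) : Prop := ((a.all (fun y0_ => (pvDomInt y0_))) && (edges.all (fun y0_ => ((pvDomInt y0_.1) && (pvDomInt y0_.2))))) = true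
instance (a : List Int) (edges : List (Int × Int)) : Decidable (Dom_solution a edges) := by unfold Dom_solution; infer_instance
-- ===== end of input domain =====

-- B replaces A's recursive DFS (mark / recurse / unmark on a visited array) by an iterative
-- post-order traversal over an explicit stack of (node, next-neighbour-index) frames, folding a
-- finished node's accumulated weight into its parent at pop time; both implementations mutate the
-- Python list `a` identically (each visited node's entry becomes its accumulated sum) and the
-- equivalence proved here is about the RETURN value.

-- ===== PORT A =====
-- graph[u].append(v)  (out-of-range u raises IndexError in Python; excluded by Pre_, no-op here)
def pvAppendAt (g : List (List Int)) (u : Int) (v : Int) : List (List Int) :=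
  match PySem.List.pyGet? g u with
  | some l => PySem.List.pySetD g u (l ++ [v])
  | none => g

-- the edge loop building the adjacency lists (textually identical in A and in B, hence shared)
def pvBuildGraph (n : Nat) (edges : List (Int × Int)) : List (List Int) :=
  edges.foldl (fun g e => pvAppendAt (pvAppendAt g e.1 e.2) e.2 e.1) (List.replicate n [])

-- number of False entries of `visited`; termination measure of the recursive dfs
def pvFalses (v : List Bool) : Nat := v.count false

-- marking an unvisited node removes one False entry (used by dfsA's termination proof)
theorem pvFalses_setTrue {v : List Bool} {i : Int}
    (h : PySem.List.pyGet? v i = some false) :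
    pvFalses (PySem.List.pySetD v i true) + 1 = pvFalses v := by
  unfold PySem.List.pyGet? at h
  cases hk : PySem.List.pyIdx? v.length i with
  | none => rw [hk] at h; simp at h
  | some k =>
    rw [hk] at h; simp only [Option.bind_some] at h
    have hlt : k < v.length := (List.getElem?_eq_some_iff.mp h).1
    have hval : v[k] = false := (List.getElem?_eq_some_iff.mp h).2
    have hset : PySem.List.pySetD v i true = v.set k true := by
      unfold PySem.List.pySetD PySem.List.pySet?
      rw [hk]; rfl
    rw [hset]
    unfold pvFalses
    have hd : v[k] :: v.drop (k + 1) = v.drop k := List.getElem_cons_drop hlt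
    rw [List.set_eq_take_append_cons_drop, if_pos hlt]
    conv_rhs => rw [← List.take_append_drop k v, ← hd]
    simp [List.count_append, hval]
    omega

-- A's inner `dfs`, recursion over the current node's remaining neighbour list `nbrs`;
-- returns (count, new a).  `visited[next]` that would raise (out of range) is skipped: Pre_ excludes it.
def dfsA (g : List (List Int)) (visited : List Bool) (a : List Int) (node : Int)
    (nbrs : List Int) : Int × List Int :=
  match nbrs with
  | [] => (0, a)
  | nxt :: rest =>
    match h2 : PySem.List.pyGet? visited nxt with
    | some false =>
      -- visited[nxt] = True ; count += dfs(nxt) + abs(a[nxt]) ; a[node] += a[nxt] ; visited[nxt] = False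
      let r1 := dfsA g (PySem.List.pySetD visited nxt true) a nxt ((PySem.List.pyGet? g nxt).getD [])
      let w := PySem.List.pyGetD r1.2 nxt 0
      let a2 := PySem.List.pySetD r1.2 node (PySem.List.pyGetD r1.2 node 0 + w)
      let r2 := dfsA g visited a2 node rest
      (r1.1 + |w| + r2.1, r2.2)
    | _ => dfsA g visited a node rest
  termination_by (pvFalses visited, nbrs.length)
  decreasing_by
  · exact Prod.Lex.left _ _ (by have := pvFalses_setTrue h2; omega)
  · exact Prod.Lex.right _ (by simp)
  · exact Prod.Lex.right _ (by simp)

def solution (a : List Int) (edges : List (Int × Int)) : Int :=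
  let length := a.length
  let graph := pvBuildGraph length edges
  -- visited = [False]*length ; visited[0] = True  (IndexError on empty a: excluded by Pre_)
  let visited := PySem.List.pySetD (List.replicate length false) 0 true
  let r := dfsA graph visited a 0 ((PySem.List.pyGet? graph 0).getD [])
  if PySem.List.pyGetD r.2 0 0 = 0 then r.1 else -1

-- ===== PORT B =====
-- the base W, remaining-work of a frame, and the potential μ: termination measure of B's while loop
def pvW (g : List (List Int)) : Nat := g.foldl (fun acc l => max acc l.length) 0 + 2

def pvRem (g : List (List Int)) (f : Int × Nat) : Nat :=
  ((PySem.List.pyGet? g f.1).getD []).length - f.2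

def pvMuGo (g : List (List Int)) : Nat → List (Int × Nat) → Nat
  | _, [] => 0
  | e, f :: r => (pvRem g f + 1) * pvW g ^ e + pvMuGo g (e + 1) r

def pvMu (g : List (List Int)) (v : List Bool) (st : List (Int × Nat)) : Nat :=
  pvMuGo g (pvFalses v + 1) st

theorem pvFalses_setFalse_le (v : List Bool) (i : Int) :
    pvFalses (PySem.List.pySetD v i false) ≤ pvFalses v + 1 := by
  unfold PySem.List.pySetD PySem.List.pySet?
  cases hk : PySem.List.pyIdx? v.length i with
  | none => simp only [Option.map_none, Option.getD_none]; omega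
  | some k =>
    simp only [Option.map_some, Option.getD_some]
    by_cases hlt : k < v.length
    · have hd : v[k] :: v.drop (k + 1) = v.drop k := List.getElem_cons_drop hlt
      unfold pvFalses
      rw [List.set_eq_take_append_cons_drop, if_pos hlt]
      conv_rhs => rw [← List.take_append_drop k v, ← hd]
      cases hvk : v[k] <;> simp [List.count_append, hvk] <;> omega
    · rw [List.set_eq_of_length_le (by omega)]
      omega

theorem pvMuGo_mono (g : List (List Int)) {e e' : Nat} (h : e ≤ e') (st : List (Int × Nat)) :
    pvMuGo g e st ≤ pvMuGo g e' st := by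
  induction st generalizing e e' with
  | nil => simp [pvMuGo]
  | cons f r ih =>
    simp only [pvMuGo]
    exact Nat.add_le_add
      (Nat.mul_le_mul_left _ (Nat.pow_le_pow_right (by unfold pvW; omega) h))
      (ih (by omega))

theorem pvMu_skip (g : List (List Int)) (v : List Bool) (node : Int) (i : Nat)
    (rest : List (Int × Nat)) (h : i < ((PySem.List.pyGet? g node).getD []).length) :
    pvMu g v ((node, i + 1) :: rest) < pvMu g v ((node, i) :: rest) := by
  unfold pvMu
  simp only [pvMuGo, pvRem]
  have hW : 0 < pvW g ^ (pvFalses v + 1) := Nat.pow_pos (by unfold pvW; omega)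
  exact Nat.add_lt_add_right (Nat.mul_lt_mul_of_pos_right (by omega) hW) _

-- every adjacency list is shorter than the base W
theorem pvLen_lt_pvW (g : List (List Int)) (x : Int) :
    ((PySem.List.pyGet? g x).getD []).length + 1 < pvW g := by
  cases hx : PySem.List.pyGet? g x with
  | none =>
    simp only [Option.getD_none, List.length_nil]
    unfold pvW
    omega
  | some l =>
    have hm := PySem.List.mem_of_pyGet?_eq_some g hx
    have := (PySem.List.le_foldl_max_nat g List.length 0).2 l hm
    unfold pvW
    simp only [Option.getD_some]
    omega

theorem pvMu_push (g : List (List Int)) (v : List Bool) (node : Int) (i : Nat)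
    (rest : List (Int × Nat)) (nxt : Int)
    (h : i < ((PySem.List.pyGet? g node).getD []).length)
    (h2 : PySem.List.pyGet? v nxt = some false) :
    pvMu g (PySem.List.pySetD v nxt true) ((nxt, 0) :: (node, i + 1) :: rest)
      < pvMu g v ((node, i) :: rest) := by
  have hcf : pvFalses (PySem.List.pySetD v nxt true) + 1 = pvFalses v := pvFalses_setTrue h2
  unfold pvMu
  simp only [pvMuGo, pvRem, Nat.sub_zero]
  set cfS := pvFalses (PySem.List.pySetD v nxt true) with hcfS
  set X := pvW g ^ (cfS + 1) with hX
  have hXpos : 0 < X := Nat.pow_pos (by unfold pvW; omega)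
  rw [← hcf]
  have hpow1 : pvW g ^ (cfS + 1 + 1) = pvW g * X := by rw [hX, pow_succ, Nat.mul_comm]
  rw [hpow1]
  have hlen : ((PySem.List.pyGet? g nxt).getD []).length + 1 + 1 ≤ pvW g := by
    have := pvLen_lt_pvW g nxt; omega
  have h1 : (((PySem.List.pyGet? g nxt).getD []).length + 1) * X + X ≤ pvW g * X := by
    calc (((PySem.List.pyGet? g nxt).getD []).length + 1) * X + X
        = (((PySem.List.pyGet? g nxt).getD []).length + 1 + 1) * X := by ring
      _ ≤ pvW g * X := Nat.mul_le_mul_right _ hlen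
  have hsplit : (((PySem.List.pyGet? g node).getD []).length - i + 1) * (pvW g * X)
      = (((PySem.List.pyGet? g node).getD []).length - (i + 1) + 1) * (pvW g * X)
        + pvW g * X := by
    rw [← Nat.succ_mul]
    congr 1
    omega
  omega

theorem pvMu_pop (g : List (List Int)) (v : List Bool) (node : Int) (i : Nat)
    (f : Int × Nat) (rest : List (Int × Nat)) :
    pvMu g (PySem.List.pySetD v node false) (f :: rest) < pvMu g v ((node, i) :: f :: rest) := by
  unfold pvMu
  calc pvMuGo g (pvFalses (PySem.List.pySetD v node false) + 1) (f :: rest)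
      ≤ pvMuGo g (pvFalses v + 1 + 1) (f :: rest) :=
        pvMuGo_mono g (by have := pvFalses_setFalse_le v node; omega) _
    _ < pvMuGo g (pvFalses v + 1) ((node, i) :: f :: rest) := by
        simp only [pvMuGo]
        have : 0 < (pvRem g (node, i) + 1) * pvW g ^ (pvFalses v + 1) :=
          Nat.mul_pos (by omega) (Nat.pow_pos (by unfold pvW; omega))
        omega

-- B's while loop: stack of frames [node, next neighbour index]; top of stack = head of list
def loopB (g : List (List Int)) (stack : List (Int × Nat)) (visited : List Bool)
    (a : List Int) (total : Int) : List Int × Int :=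
  match stack with
  | [] => (a, total)
  | (node, i) :: rest =>
    let nbrs := (PySem.List.pyGet? g node).getD []
    if h : i < nbrs.length then
      -- stack[-1][1] = i+1 ; nxt = graph[node][i] ; if not visited[nxt]: mark and push
      match h2 : PySem.List.pyGet? visited nbrs[i] with
      | some false =>
        loopB g ((nbrs[i], 0) :: (node, i + 1) :: rest)
          (PySem.List.pySetD visited nbrs[i] true) a total
      | _ => loopB g ((node, i + 1) :: rest) visited a total
    else
      -- frame exhausted: pop; if a parent remains, count this node and fold it into the parent
      match rest with
      | [] => (a, total)
      | (p, j) :: rr =>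
        let w := PySem.List.pyGetD a node 0
        loopB g ((p, j) :: rr) (PySem.List.pySetD visited node false)
          (PySem.List.pySetD a p (PySem.List.pyGetD a p 0 + w)) (total + |w|)
  termination_by pvMu g visited stack
  decreasing_by
  · exact pvMu_push g visited node i rest _ h h2
  · exact pvMu_skip g visited node i rest h
  · exact pvMu_pop g visited node i (p, j) rr

def solution_alt (a : List Int) (edges : List (Int × Int)) : Int :=
  let n := a.length
  let graph := pvBuildGraph n edges
  let visited := PySem.List.pySetD (List.replicate n false) 0 true
  let r := loopB graph [(0, 0)] visited a 0
  if PySem.List.pyGetD r.1 0 0 = 0 then r.2 else -1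

-- ===== PRECONDITION & SPEC =====
-- Pre_ excludes exactly the inputs on which the Python raises IndexError: an empty `a`
-- (visited[0] = True fails) and edges with an endpoint outside [-len(a), len(a)).
def Pre_solution (a : List Int) (edges : List (Int × Int)) : Prop :=
  a ≠ [] ∧ ∀ p ∈ edges, PySem.Raise.InRange a.length p.1 ∧ PySem.Raise.InRange a.length p.2

instance (a : List Int) (edges : List (Int × Int)) : Decidable (Pre_solution a edges) := by
  unfold Pre_solution PySem.Raise.InRange; infer_instance

def pvWitness_solution : List Int × (List (Int × Int)) := ([1, -1], [(0, 1)])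

def Spec_solution (a : List Int) (edges : List (Int × Int)) (out : Int) : Prop := out = solution_alt a edges
instance (a : List Int) (edges : List (Int × Int)) (out : Int) : Decidable (Spec_solution a edges out) := by unfold Spec_solution; infer_instance

-- ===== CLAIM (what is proved, stated in full; the proofs are below) =====
def Claim_equal_solution : Prop := ∀ (a : List Int) (edges : List (Int × Int)), Dom_solution a edges → Pre_solution a edges → Spec_solution a edges (solution a edges)

-- ===== LEMMAS AND PROOFS =====

-- unmarking the node just marked restores `visited` exactly
theorem pvSet_restore {v : List Bool} {i : Int}
    (h : PySem.List.pyGet? v i = some false) :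
    PySem.List.pySetD (PySem.List.pySetD v i true) i false = v := by
  unfold PySem.List.pyGet? at h
  cases hk : PySem.List.pyIdx? v.length i with
  | none => rw [hk] at h; simp at h
  | some k =>
    rw [hk] at h; simp only [Option.bind_some] at h
    have hlt : k < v.length := (List.getElem?_eq_some_iff.mp h).1
    have hval : v[k] = false := (List.getElem?_eq_some_iff.mp h).2
    have hset : PySem.List.pySetD v i true = v.set k true := by
      unfold PySem.List.pySetD PySem.List.pySet?
      rw [hk]; rfl
    have hset2 : PySem.List.pySetD (v.set k true) i false = (v.set k true).set k false := by
      unfold PySem.List.pySetD PySem.List.pySet?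
      rw [List.length_set, hk]; rfl
    rw [hset, hset2, List.set_set, ← hval]
    exact List.set_getElem_self hlt

-- one-step equations of dfsA, in the form the simulation proof uses
theorem dfsA_skip (g : List (List Int)) (v : List Bool) (a : List Int) (node nxt : Int)
    (rest : List Int) (h2 : PySem.List.pyGet? v nxt ≠ some false) :
    dfsA g v a node (nxt :: rest) = dfsA g v a node rest := by
  rw [dfsA]
  split
  · rename_i heq; exact absurd heq h2
  · rfl

theorem dfsA_push (g : List (List Int)) (v : List Bool) (a : List Int) (node nxt : Int)
    (rest : List Int) (h2 : PySem.List.pyGet? v nxt = some false) :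
    dfsA g v a node (nxt :: rest) =
      (let r1 := dfsA g (PySem.List.pySetD v nxt true) a nxt ((PySem.List.pyGet? g nxt).getD []);
       let w := PySem.List.pyGetD r1.2 nxt 0;
       let a2 := PySem.List.pySetD r1.2 node (PySem.List.pyGetD r1.2 node 0 + w);
       let r2 := dfsA g v a2 node rest;
       (r1.1 + |w| + r2.1, r2.2)) := by
  rw [dfsA]
  split
  · rfl
  · rename_i heq
    exact (heq h2).elim

-- A's dfs, read off a stack: process the top frame's remaining neighbours, then fold the
-- finished node into its parent frame and continue (structural recursion on the stack)
def pvSpec (g : List (List Int)) : List (Int × Nat) → List Bool → List Int → Int → List Int × Int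
  | [], _, a, t => (a, t)
  | (node, i) :: rest, v, a, t =>
    let r := dfsA g v a node (((PySem.List.pyGet? g node).getD []).drop i)
    match rest with
    | [] => (r.2, t + r.1)
    | (p, j) :: rr =>
      let w := PySem.List.pyGetD r.2 node 0
      pvSpec g ((p, j) :: rr) (PySem.List.pySetD v node false)
        (PySem.List.pySetD r.2 p (PySem.List.pyGetD r.2 p 0 + w)) (t + r.1 + |w|)

-- the four stack-step identities of pvSpec
theorem pvSpec_pop_root (g : List (List Int)) (v : List Bool) (a : List Int) (t : Int)
    (p : Int) (j : Nat) (hj : ¬ j < ((PySem.List.pyGet? g p).getD []).length) :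
    pvSpec g [(p, j)] v a t = (a, t) := by
  rw [pvSpec.eq_2, List.drop_of_length_le (by omega)]
  simp [dfsA]

theorem pvSpec_pop (g : List (List Int)) (v : List Bool) (a : List Int) (t : Int)
    (p : Int) (j : Nat) (f : Int × Nat) (rr : List (Int × Nat))
    (hj : ¬ j < ((PySem.List.pyGet? g p).getD []).length) :
    pvSpec g ((p, j) :: f :: rr) v a t =
      pvSpec g (f :: rr) (PySem.List.pySetD v p false)
        (PySem.List.pySetD a f.1 (PySem.List.pyGetD a f.1 0 + PySem.List.pyGetD a p 0))
        (t + |PySem.List.pyGetD a p 0|) := by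
  obtain ⟨p1, j1⟩ := f
  rw [pvSpec.eq_3, List.drop_of_length_le (by omega)]
  simp [dfsA]

theorem pvSpec_skip (g : List (List Int)) (v : List Bool) (a : List Int) (t : Int)
    (p : Int) (j : Nat) (rr : List (Int × Nat))
    (h : j < ((PySem.List.pyGet? g p).getD []).length)
    (h2 : PySem.List.pyGet? v (((PySem.List.pyGet? g p).getD [])[j]) ≠ some false) :
    pvSpec g ((p, j) :: rr) v a t = pvSpec g ((p, j + 1) :: rr) v a t := by
  cases rr with
  | nil =>
    rw [pvSpec.eq_2, pvSpec.eq_2, List.drop_eq_getElem_cons h, dfsA_skip _ _ _ _ _ _ h2]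
  | cons f rs =>
    obtain ⟨q, k⟩ := f
    rw [pvSpec.eq_3, pvSpec.eq_3, List.drop_eq_getElem_cons h, dfsA_skip _ _ _ _ _ _ h2]

theorem pvSpec_push (g : List (List Int)) (v : List Bool) (a : List Int) (t : Int)
    (p : Int) (j : Nat) (rr : List (Int × Nat))
    (h : j < ((PySem.List.pyGet? g p).getD []).length)
    (h2 : PySem.List.pyGet? v (((PySem.List.pyGet? g p).getD [])[j]) = some false) :
    pvSpec g ((((PySem.List.pyGet? g p).getD [])[j], 0) :: (p, j + 1) :: rr)
        (PySem.List.pySetD v (((PySem.List.pyGet? g p).getD [])[j]) true) a t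
      = pvSpec g ((p, j) :: rr) v a t := by
  cases rr with
  | nil =>
    rw [pvSpec.eq_3, pvSpec.eq_2, pvSpec.eq_2, pvSet_restore h2, List.drop_zero,
        List.drop_eq_getElem_cons h, dfsA_push _ _ _ _ _ _ h2]
    dsimp only
    congr 1
    omega
  | cons f rs =>
    obtain ⟨q, k⟩ := f
    rw [pvSpec.eq_3, pvSpec.eq_3, pvSpec.eq_3, pvSet_restore h2, List.drop_zero,
        List.drop_eq_getElem_cons h, dfsA_push _ _ _ _ _ _ h2]
    dsimp only
    congr 1
    omega

theorem loopB_eq_pvSpec (g : List (List Int)) (stack : List (Int × Nat)) (visited : List Bool)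
    (a : List Int) (total : Int) :
    loopB g stack visited a total = pvSpec g stack visited a total := by
  fun_induction loopB g stack visited a total with
  | case1 visited a total => rw [pvSpec.eq_1]
  | case2 visited a total p j rr nbrs h h2 ih =>
    rw [ih]
    exact pvSpec_push g visited a total p j rr h h2
  | case3 visited a total p j rr nbrs h h2 ih =>
    rw [ih]
    exact (pvSpec_skip g visited a total p j rr h h2).symm
  | case4 visited a total p j nbrs hj =>
    exact (pvSpec_pop_root g visited a total p j hj).symm
  | case5 visited a total p j nbrs hj p1 j1 rr w ih =>
    rw [ih]
    exact (pvSpec_pop g visited a total p j (p1, j1) rr hj).symm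

-- ===== VERDICT (by name: the statement is the Claim_ definition above) =====
theorem solution_spec : Claim_equal_solution := by
  intro a edges _ _
  unfold Spec_solution solution solution_alt
  dsimp only
  rw [loopB_eq_pvSpec, pvSpec.eq_2, List.drop_zero]
  dsimp only
  rw [zero_add]
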